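-- pv_equiv track=rewrite | github.com/jasonwaseq/FPGA-DVS-Gesture-Classifier | tb/voxel_bin_architecture/test_systolic_array.py | pack_weights
-- ===== SOURCE A (Python) =====
-- NUM_CLASSES = 4
--
-- WEIGHT_BITS = 8
--
-- def pack_weights(weight_matrix, addrs):
--     """
--     Pack PARALLEL_INPUTS * NUM_CLASSES weights into w_data_flat.
--     weight_matrix[cell][class] -> signed WEIGHT_BITS.
--     """
--     result = 0
--     for p_idx, addr in enumerate(addrs):
--         for k in range(NUM_CLASSES):
--             w = weight_matrix[addr][k] & ((1 << WEIGHT_BITS) - 1)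
--             bit_pos = p_idx * NUM_CLASSES * WEIGHT_BITS + k * WEIGHT_BITS
--             result |= w << bit_pos
--     return result
-- ===== SOURCE B (Python) =====
-- NUM_CLASSES = 4
--
-- WEIGHT_BITS = 8
--
-- def pack_weights(weight_matrix, addrs):
--     # Byte-buffer formulation: each weight is exactly one byte (WEIGHT_BITS == 8),
--     # so collect the masked weights little-endian and convert once.
--     buf = bytearray()
--     for addr in addrs:
--         for k in range(NUM_CLASSES):
--             buf.append(weight_matrix[addr][k] & 0xFF)
--     return int.from_bytes(buf, 'little')
-- ===== Notes on version B (the rewrite author's own statement) =====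
-- stated objective: simpler
-- what changed: Instead of computing a bit position and OR-ing shifted values into an accumulator, B appends each masked weight as one byte to a bytearray (valid because WEIGHT_BITS is 8) and does the whole bit assembly with a single int.from_bytes(buf, 'little') call.
import Mathlib
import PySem

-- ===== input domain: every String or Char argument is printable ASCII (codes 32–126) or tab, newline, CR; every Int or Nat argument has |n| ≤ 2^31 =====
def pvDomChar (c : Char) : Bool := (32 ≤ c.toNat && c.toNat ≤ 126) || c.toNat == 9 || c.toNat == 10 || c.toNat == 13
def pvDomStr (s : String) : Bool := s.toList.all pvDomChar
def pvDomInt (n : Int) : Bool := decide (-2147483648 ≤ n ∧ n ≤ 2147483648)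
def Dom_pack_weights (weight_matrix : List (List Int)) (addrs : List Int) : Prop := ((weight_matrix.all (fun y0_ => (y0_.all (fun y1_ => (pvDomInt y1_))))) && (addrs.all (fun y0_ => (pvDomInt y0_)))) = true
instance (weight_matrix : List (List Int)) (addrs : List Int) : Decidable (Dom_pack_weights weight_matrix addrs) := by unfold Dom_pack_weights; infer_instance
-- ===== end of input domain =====

-- B packs the same weights by appending each masked weight as one byte to a buffer
-- and converting once little-endian (WEIGHT_BITS = 8), instead of OR-ing shifted values.


-- ===== PORT A =====
-- literal transliteration of A: enumerate over addrs, inner loop over range(NUM_CLASSES),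
-- result |= (weight_matrix[addr][k] & 0xFF) << bit_pos
def pack_weights (weight_matrix : List (List Int)) (addrs : List Int) : Int :=
  (PySem.List.enumerate addrs).foldl (fun result pa =>
    (PySem.List.pyRange 0 4 1).foldl (fun result k =>
      let w := PySem.Int.band ((PySem.List.pyGet? ((PySem.List.pyGet? weight_matrix pa.2).getD []) k).getD 0) 255
      let bit_pos : Int := pa.1 * 4 * 8 + k * 8
      PySem.Int.bor result (w <<< bit_pos.toNat)) result) 0

-- ===== PORT B =====
-- literal transliteration of B: build the byte buffer by appending one masked weight per step,
-- then int.from_bytes(buf, 'little') = foldr (b + 256 * acc).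
def pack_weights_alt (weight_matrix : List (List Int)) (addrs : List Int) : Int :=
  let buf := addrs.foldl (fun buf addr =>
    (PySem.List.pyRange 0 4 1).foldl (fun buf k =>
      buf ++ [PySem.Int.band ((PySem.List.pyGet? ((PySem.List.pyGet? weight_matrix addr).getD []) k).getD 0) 255]) buf) ([] : List Int)
  buf.foldr (fun b acc => b + 256 * acc) 0

-- ===== PRECONDITION & SPEC =====
-- Pre_ excludes exactly the inputs where Python A raises IndexError: an addr that is not a
-- valid (possibly negative) index into weight_matrix, or a selected row with fewer than 4 entries.
def Pre_pack_weights (weight_matrix : List (List Int)) (addrs : List Int) : Prop :=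
  ∀ a ∈ addrs, 4 ≤ (((PySem.List.pyGet? weight_matrix a).map List.length).getD 0)
instance (weight_matrix : List (List Int)) (addrs : List Int) : Decidable (Pre_pack_weights weight_matrix addrs) := by unfold Pre_pack_weights; infer_instance
def pvWitness_pack_weights : List (List Int) × List Int := ([[1, -2, 3, 4], [5, 6, -7, 8]], [1, 0, -1])

def Spec_pack_weights (weight_matrix : List (List Int)) (addrs : List Int) (out : Int) : Prop := out = pack_weights_alt weight_matrix addrs
instance (weight_matrix : List (List Int)) (addrs : List Int) (out : Int) : Decidable (Spec_pack_weights weight_matrix addrs out) := by unfold Spec_pack_weights; infer_instance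

-- ===== CLAIM (what is proved, stated in full; the proofs are below) =====
def Claim_equal_pack_weights : Prop := ∀ (weight_matrix : List (List Int)) (addrs : List Int), Dom_pack_weights weight_matrix addrs → Pre_pack_weights weight_matrix addrs → Spec_pack_weights weight_matrix addrs (pack_weights weight_matrix addrs)

-- ===== LEMMAS AND PROOFS =====

-- ===== VERDICT (by name: the statement is the Claim_ definition above) =====

-- ===== LEMMAS AND PROOFS =====

-- the masked byte both programs extract for (addr, k)
def pvByte (wm : List (List Int)) (a k : Int) : Int :=
  PySem.Int.band ((PySem.List.pyGet? ((PySem.List.pyGet? wm a).getD []) k).getD 0) 255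

def pvRow (wm : List (List Int)) (a : Int) : List Int :=
  [pvByte wm a 0, pvByte wm a 1, pvByte wm a 2, pvByte wm a 3]

def pvBase (l : List Int) : Int := l.foldr (fun b acc => b + 256 * acc) 0

-- A's inner loop as a single step over one enumerated address
def pvStep (wm : List (List Int)) (result : Int) (pa : Int × Int) : Int :=
  PySem.Int.bor (PySem.Int.bor (PySem.Int.bor (PySem.Int.bor result
    (pvByte wm pa.2 0 <<< ((pa.1 * 4 * 8 + 0 * 8 : Int).toNat)))
    (pvByte wm pa.2 1 <<< ((pa.1 * 4 * 8 + 1 * 8 : Int).toNat)))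
    (pvByte wm pa.2 2 <<< ((pa.1 * 4 * 8 + 2 * 8 : Int).toNat)))
    (pvByte wm pa.2 3 <<< ((pa.1 * 4 * 8 + 3 * 8 : Int).toNat))

theorem pack_weights_eq (wm : List (List Int)) (addrs : List Int) :
    pack_weights wm addrs = (PySem.List.enumerate addrs).foldl (pvStep wm) 0 := rfl

theorem band255_bounds (x : Int) : 0 ≤ PySem.Int.band x 255 ∧ PySem.Int.band x 255 < 256 := by
  have h255 : ((255:Int).toNat) = 255 := rfl
  unfold PySem.Int.band
  split_ifs with h1 h2 h3
  · rw [h255]; have := Nat.and_le_right (n := x.toNat) (m := 255); omega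
  · norm_num at h2
  · rw [h255]; omega
  · norm_num at h3

theorem pvByte_bounds (wm : List (List Int)) (a k : Int) : 0 ≤ pvByte wm a k ∧ pvByte wm a k < 256 :=
  band255_bounds _

theorem lor_mul_pow (m r b : Nat) (h : r < 2^m) : r ||| b <<< m = b * 2^m + r := by
  apply Nat.eq_of_testBit_eq
  intro j
  rw [Nat.testBit_lor, Nat.testBit_shiftLeft, mul_comm b, Nat.testBit_two_pow_mul_add b h j]
  by_cases hj : j < m
  · simp [hj, Nat.not_le.mpr hj]
  · simp [hj, Nat.le_of_not_lt hj, Nat.testBit_lt_two_pow (lt_of_lt_of_le h (Nat.pow_le_pow_right (by norm_num) (Nat.le_of_not_lt hj)))]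

theorem bor_shift_eq_add (r w : Int) (t : Nat) (h0 : 0 ≤ r) (hr : r < 2^t) (hw0 : 0 ≤ w) :
    PySem.Int.bor r (w <<< t) = w * 2^t + r := by
  rw [Int.shiftLeft_eq]
  have hwt : 0 ≤ w * 2^t := by positivity
  rw [PySem.Int.bor_of_nonneg h0 hwt]
  have h1 : (w * 2^t).toNat = w.toNat * 2^t := by
    rcases Int.eq_ofNat_of_zero_le hw0 with ⟨m, rfl⟩
    have : ((m:Int) * 2^t) = ((m * 2^t : Nat) : Int) := by push_cast; ring
    rw [this, Int.toNat_natCast, Int.toNat_natCast]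
  have hrn : r.toNat < 2^t := by
    have h2 : (r.toNat : Int) < ((2^t : Nat) : Int) := by
      rw [Int.toNat_of_nonneg h0]; exact_mod_cast hr
    exact_mod_cast h2
  rw [h1, ← Nat.shiftLeft_eq, lor_mul_pow t r.toNat w.toNat hrn]
  push_cast
  rw [Int.toNat_of_nonneg hw0, Int.toNat_of_nonneg h0]

theorem pvBase_row_bounds (wm : List (List Int)) (a : Int) :
    0 ≤ pvBase (pvRow wm a) ∧ pvBase (pvRow wm a) < 2^32 := by
  obtain ⟨l0, u0⟩ := pvByte_bounds wm a 0
  obtain ⟨l1, u1⟩ := pvByte_bounds wm a 1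
  obtain ⟨l2, u2⟩ := pvByte_bounds wm a 2
  obtain ⟨l3, u3⟩ := pvByte_bounds wm a 3
  simp only [pvBase, pvRow, List.foldr]
  constructor <;> omega

theorem pvStep_eq (wm : List (List Int)) (a : Int) (n : Nat) (r : Int)
    (h0 : 0 ≤ r) (hr : r < 2^(32*n)) :
    pvStep wm r ((n : Int), a) = r + 2^(32*n) * pvBase (pvRow wm a) := by
  obtain ⟨l0, u0⟩ := pvByte_bounds wm a 0
  obtain ⟨l1, u1⟩ := pvByte_bounds wm a 1
  obtain ⟨l2, u2⟩ := pvByte_bounds wm a 2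
  obtain ⟨l3, u3⟩ := pvByte_bounds wm a 3
  have e0 : (((n:Int)) * 4 * 8 + 0 * 8).toNat = 32*n := by omega
  have e1 : (((n:Int)) * 4 * 8 + 1 * 8).toNat = 32*n + 8 := by omega
  have e2 : (((n:Int)) * 4 * 8 + 2 * 8).toNat = 32*n + 16 := by omega
  have e3 : (((n:Int)) * 4 * 8 + 3 * 8).toNat = 32*n + 24 := by omega
  have p8 : (2:Int)^(32*n+8) = 2^(32*n) * 256 := by rw [pow_add]; norm_num
  have p16 : (2:Int)^(32*n+16) = 2^(32*n) * 65536 := by rw [pow_add]; norm_num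
  have p24 : (2:Int)^(32*n+24) = 2^(32*n) * 16777216 := by rw [pow_add]; norm_num
  have hp : (0:Int) < 2^(32*n) := by positivity
  simp only [pvStep, e0, e1, e2, e3]
  rw [bor_shift_eq_add _ _ _ h0 hr l0]
  rw [bor_shift_eq_add _ _ _ (by nlinarith) (by nlinarith) l1]
  rw [bor_shift_eq_add _ _ _ (by nlinarith) (by nlinarith) l2]
  rw [bor_shift_eq_add _ _ _ (by nlinarith) (by nlinarith) l3]
  simp only [pvBase, pvRow, List.foldr]
  rw [p8, p16, p24]; ring

theorem pvBase_row_append (wm : List (List Int)) (a : Int) (l : List Int) :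
    pvBase (pvRow wm a ++ l) = pvBase (pvRow wm a) + 2^32 * pvBase l := by
  simp only [pvBase, pvRow, List.cons_append, List.nil_append, List.foldr]
  ring

theorem outer_eq (wm : List (List Int)) (addrs : List Int) : ∀ (n : Nat) (r : Int),
    0 ≤ r → r < 2^(32*n) →
    (PySem.List.enumerate addrs (n : Int)).foldl (pvStep wm) r
      = r + 2^(32*n) * pvBase (addrs.flatMap (pvRow wm)) := by
  induction addrs with
  | nil => intro n r h0 hr; simp [PySem.List.enumerate, pvBase]
  | cons a rest ih =>
    intro n r h0 hr
    rw [PySem.List.enumerate_cons, List.foldl_cons, pvStep_eq wm a n r h0 hr]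
    obtain ⟨bl, bu⟩ := pvBase_row_bounds wm a
    have hp : (0:Int) < 2^(32*n) := by positivity
    have hcast : ((n:Int) + 1) = ((n+1 : Nat) : Int) := by push_cast; ring
    have hpow : (2:Int)^(32*(n+1)) = 2^(32*n) * 2^32 := by rw [show 32*(n+1) = 32*n + 32 from by ring, pow_add]
    rw [hcast, ih (n+1) _ (by nlinarith) (by nlinarith)]
    simp only [List.flatMap_cons]
    rw [pvBase_row_append, hpow]
    ring

theorem alt_eq (wm : List (List Int)) (addrs : List Int) :
    pack_weights_alt wm addrs = pvBase (addrs.flatMap (pvRow wm)) := by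
  have key : ∀ (as : List Int) (l : List Int),
      as.foldl (fun buf addr =>
        (PySem.List.pyRange 0 4 1).foldl (fun buf k =>
          buf ++ [PySem.Int.band ((PySem.List.pyGet? ((PySem.List.pyGet? wm addr).getD []) k).getD 0) 255]) buf) l
        = l ++ as.flatMap (pvRow wm) := by
    intro as
    induction as with
    | nil => intro l; simp
    | cons a rest ih =>
      intro l
      rw [List.foldl_cons, ih]
      simp [show PySem.List.pyRange 0 4 1 = [0,1,2,3] from by decide, List.foldl, pvRow, pvByte,
        List.append_assoc]
  simp only [pack_weights_alt, key addrs [], List.nil_append, pvBase]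

-- ===== VERDICT (by name: the statement is the Claim_ definition above) =====
theorem pack_weights_spec : Claim_equal_pack_weights := by
  intro wm addrs _ _
  unfold Spec_pack_weights
  rw [alt_eq, pack_weights_eq]
  have h := outer_eq wm addrs 0 0 le_rfl (by norm_num)
  rw [Nat.cast_zero] at h
  rw [h]
  norm_num
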